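-- pv_equiv track=rewrite | github.com/ulturgashevme/get | 5-3-adc-volume.py | dec2max
-- ===== SOURCE A (Python) =====
-- def dec2max(value):
--     arr = [0,0,0,0,0,0,0,0]
--     if value == 0: return  arr
--     if value == 255: return [1,1,1,1,1,1,1,1]
--     index = (bin(value)[2:].zfill(8)).find('1')
--     for i in range(8):
--         if (i > index): arr[i] = 1
--     return arr
-- ===== SOURCE B (Python) =====
-- def dec2max(value):
--     if value == 0:
--         return [0, 0, 0, 0, 0, 0, 0, 0]
--     if value == 255:
--         return [1, 1, 1, 1, 1, 1, 1, 1]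
--     a = abs(value)
--     return [0] + [1 if a >= t else 0 for t in (128, 64, 32, 16, 8, 4, 2)]
-- ===== Notes on version B (the rewrite author's own statement) =====
-- stated objective: simpler
-- what changed: Instead of locating the MSB (A builds a zero-filled binary string and finds the first '1', then loops filling indices past it), B never computes a position at all: each output bit is an independent comparison of abs(value) against a fixed power-of-two threshold table.
-- outside the precondition, e.g. on dec2max(-128): A returns [0, 0, 1, 1, 1, 1, 1, 1], B returns [0, 1, 1, 1, 1, 1, 1, 1]
import Mathlib
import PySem

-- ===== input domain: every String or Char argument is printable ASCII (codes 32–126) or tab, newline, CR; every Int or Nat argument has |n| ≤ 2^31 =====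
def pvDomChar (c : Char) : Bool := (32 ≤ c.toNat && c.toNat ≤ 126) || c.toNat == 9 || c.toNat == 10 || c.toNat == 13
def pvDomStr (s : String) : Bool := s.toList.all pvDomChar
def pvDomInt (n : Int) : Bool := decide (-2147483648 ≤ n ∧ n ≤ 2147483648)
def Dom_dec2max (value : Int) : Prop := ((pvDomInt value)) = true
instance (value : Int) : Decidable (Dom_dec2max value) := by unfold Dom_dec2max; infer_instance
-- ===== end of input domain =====

-- B replaces A's bin()-string MSB search + per-index loop with per-bit comparisons
-- of abs(value) against a fixed power-of-two threshold table (objective: simpler).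


-- ===== PORT A =====
-- binary digit string of a natural number, most significant first (Python's bin(n) without the '0b' prefix)
def pvBinDigits (n : Nat) : List Char :=
  if _h : n < 2 then [if n = 1 then '1' else '0']
  else pvBinDigits (n / 2) ++ [if n % 2 = 1 then '1' else '0']
termination_by n
decreasing_by omega

-- str.zfill(8): pad on the left with '0' to length 8
def pvZfill8 (s : List Char) : List Char := List.replicate (8 - s.length) '0' ++ s

-- str.find('1'): index of first '1', or -1
def pvFind1 : List Char → Int
  | [] => -1
  | c :: t =>
    if c = '1' then 0
    else
      let r := pvFind1 t
      if r = -1 then -1 else r + 1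

def dec2max (value : Int) : List Int :=
  if value = 0 then [0, 0, 0, 0, 0, 0, 0, 0]
  else if value = 255 then [1, 1, 1, 1, 1, 1, 1, 1]
  else
    -- bin(value)[2:] is 'b'+digits for negative value, digits for positive
    let index := pvFind1 (pvZfill8
      (if value < 0 then 'b' :: pvBinDigits (-value).toNat else pvBinDigits value.toNat))
    (List.range 8).map (fun (i : Nat) => if (i : Int) > index then (1 : Int) else 0)

-- ===== PORT B =====
def dec2max_alt (value : Int) : List Int :=
  if value = 0 then [0, 0, 0, 0, 0, 0, 0, 0]
  else if value = 255 then [1, 1, 1, 1, 1, 1, 1, 1]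
  else
    let a : Int := |value|
    0 :: [128, 64, 32, 16, 8, 4, 2].map (fun t => if a ≥ t then (1 : Int) else 0)

-- ===== PRECONDITION & SPEC =====
-- Pre_ excludes values below -127: negative input is outside the 8-bit ADC purpose of
-- the function, and there A's mask comes from find('1') over a string that still
-- contains the 'b' of the '-0b' prefix while B compares the magnitude against its
-- thresholds — neither value is specified; the remaining negatives agree and stay inside Pre_.
def Pre_dec2max (value : Int) : Prop := -128 < value
instance (value : Int) : Decidable (Pre_dec2max value) := by unfold Pre_dec2max; infer_instance
def pvWitness_dec2max : Int := (5)
def Spec_dec2max (value : Int) (out : List Int) : Prop := out = dec2max_alt value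
instance (value : Int) (out : List Int) : Decidable (Spec_dec2max value out) := by unfold Spec_dec2max; infer_instance

-- ===== CLAIM (what is proved, stated in full; the proofs are below) =====
def Claim_equal_dec2max : Prop := ∀ (value : Int), Dom_dec2max value → Pre_dec2max value → Spec_dec2max value (dec2max value)

-- ===== LEMMAS AND PROOFS =====

-- Python's int.bit_length of a natural number (used only in the proof, to name the MSB position)
def pvBitLen (n : Nat) : Nat :=
  if n = 0 then 0 else pvBitLen (n / 2) + 1
termination_by n
decreasing_by omega

-- pvBinDigits of a positive number starts with '1'
theorem pvBinDigits_head (n : Nat) (h : 1 ≤ n) : ∃ t, pvBinDigits n = '1' :: t := by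
  induction n using Nat.strong_induction_on with
  | _ n ih =>
    rw [pvBinDigits]
    split
    · have : n = 1 := by omega
      subst this; exact ⟨[], by decide⟩
    · obtain ⟨t, ht⟩ := ih (n / 2) (by omega) (by omega)
      exact ⟨t ++ [if n % 2 = 1 then '1' else '0'], by rw [ht]; rfl⟩

-- length of the digit string = bit length, for positive n
theorem pvBinDigits_length (n : Nat) (h : 1 ≤ n) : (pvBinDigits n).length = pvBitLen n := by
  induction n using Nat.strong_induction_on with
  | _ n ih =>
    rw [pvBinDigits, pvBitLen, if_neg (show ¬n = 0 by omega)]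
    by_cases h2 : n < 2
    · rw [dif_pos h2]
      have : n = 1 := by omega
      subst this; simp [pvBitLen]
    · rw [dif_neg h2]
      simp [ih (n / 2) (by omega) (by omega)]

theorem pvBitLen_le (k : Nat) : ∀ n, n < 2 ^ k → pvBitLen n ≤ k := by
  induction k with
  | zero => intro n h; interval_cases n; simp [pvBitLen]
  | succ k ih =>
    intro n h
    rw [pvBitLen]
    split
    · omega
    · have := ih (n / 2) (by omega)
      omega

theorem pvBitLen_lt (n : Nat) : n < 2 ^ pvBitLen n := by
  induction n using Nat.strong_induction_on with
  | _ n ih =>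
    rw [pvBitLen]
    split
    · simp only [pow_zero]; omega
    · have := ih (n / 2) (by omega)
      rw [pow_succ]
      omega

-- characterisation used for B's thresholds: 2^k ≤ n ↔ k + 1 ≤ bit length
theorem pvBitLen_ge_iff (n k : Nat) : 2 ^ k ≤ n ↔ k + 1 ≤ pvBitLen n := by
  constructor
  · intro h
    have h2 := pvBitLen_lt n
    have : 2 ^ k < 2 ^ pvBitLen n := by omega
    have := (Nat.pow_lt_pow_iff_right (by omega : 1 < 2)).mp this
    omega
  · intro h
    by_contra hc
    have := pvBitLen_le k n (by omega)
    omega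

theorem pvFind1_cons_ne (c : Char) (s : List Char) (hc : c ≠ '1') (hs : pvFind1 s ≠ -1) :
    pvFind1 (c :: s) = pvFind1 s + 1 := by
  simp [pvFind1, hc, hs]

theorem pvFind1_one (t : List Char) : pvFind1 ('1' :: t) = 0 := by simp [pvFind1]

theorem pvFind1_replicate (k : Nat) (s : List Char) (hs : 0 ≤ pvFind1 s) :
    pvFind1 (List.replicate k '0' ++ s) = pvFind1 s + k := by
  induction k with
  | zero => simp
  | succ k ih =>
    rw [List.replicate_succ, List.cons_append,
      pvFind1_cons_ne '0' _ (by decide) (by rw [ih]; omega), ih]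
    omega

theorem dec2max_spec' (value : Int) (hpre : Pre_dec2max value) :
    dec2max value = dec2max_alt value := by
  unfold dec2max dec2max_alt
  by_cases h0 : value = 0
  · simp [h0]
  by_cases h255 : value = 255
  · simp [h255]
  rw [if_neg h0, if_neg h255, if_neg h0, if_neg h255]
  have hL1 : 1 ≤ pvBitLen value.natAbs := by
    rw [pvBitLen]; rw [if_neg (by omega)]; omega
  set L : Nat := pvBitLen value.natAbs with hLdef
  -- the index A computes equals  max 0 (8 - L)  where L is the bit length of |value|
  have hidx : pvFind1 (pvZfill8
      (if value < 0 then 'b' :: pvBinDigits (-value).toNat else pvBinDigits value.toNat)) =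
      max 0 (8 - (L : Int)) := by
    by_cases hneg : value < 0
    · -- -127 ≤ value ≤ -1 : string is zeros ++ 'b' ++ '1'-led digits, find = 8 - L with L ≤ 7
      have habs : (-value).toNat = value.natAbs := by omega
      have h1 : 1 ≤ value.natAbs := by omega
      obtain ⟨t, ht⟩ := pvBinDigits_head value.natAbs h1
      have hlen := pvBinDigits_length value.natAbs h1
      have hL7 : L ≤ 7 := by
        have : value.natAbs < 2 ^ 7 := by unfold Pre_dec2max at hpre; omega
        exact pvBitLen_le 7 value.natAbs this
      rw [if_pos hneg, habs, ht]
      unfold pvZfill8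
      have hlen' : ('b' :: '1' :: t).length = L + 1 := by
        simpa [ht] using hlen
      rw [hlen', pvFind1_replicate _ _ (by
          rw [pvFind1_cons_ne 'b' _ (by decide) (by rw [pvFind1_one]; omega), pvFind1_one]
          norm_num),
        pvFind1_cons_ne 'b' _ (by decide) (by rw [pvFind1_one]; omega), pvFind1_one]
      omega
    · -- value ≥ 1 : string is zeros ++ '1'-led digits, find = max 0 (8 - L)
      have habs : value.toNat = value.natAbs := by omega
      have h1 : 1 ≤ value.natAbs := by omega
      obtain ⟨t, ht⟩ := pvBinDigits_head value.natAbs h1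
      have hlen := pvBinDigits_length value.natAbs h1
      rw [if_neg hneg, habs, ht]
      unfold pvZfill8
      have hlen' : ('1' :: t).length = L := by simpa [ht] using hlen
      rw [hlen', pvFind1_replicate _ _ (by rw [pvFind1_one]), pvFind1_one]
      omega
  rw [hidx]
  -- B's thresholds against |value| decide exactly  i > max 0 (8 - L)  at each position
  have habs : |value| = (value.natAbs : Int) := Int.abs_eq_natAbs value
  have hg : ∀ k : Nat, ((2 : Int) ^ k ≤ (value.natAbs : Int) ↔ k + 1 ≤ L) := by
    intro k
    rw [show ((2 : Int) ^ k) = ((2 ^ k : Nat) : Int) by push_cast; ring, Int.ofNat_le]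
    exact pvBitLen_ge_iff value.natAbs k
  have h7 := hg 7; have h6 := hg 6; have h5 := hg 5; have h4 := hg 4
  have h3 := hg 3; have h2 := hg 2; have h1 := hg 1
  norm_num at h7 h6 h5 h4 h3 h2 h1
  rw [show List.range 8 = ([0, 1, 2, 3, 4, 5, 6, 7] : List Nat) from by decide]
  simp only [List.map_cons, List.map_nil, habs, List.cons.injEq]
  refine ⟨?_, ?_, ?_, ?_, ?_, ?_, ?_, ?_, trivial⟩ <;>
    first
      | rfl
      | (push_cast; split_ifs <;> omega)

-- ===== VERDICT (by name: the statement is the Claim_ definition above) =====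
theorem dec2max_spec : Claim_equal_dec2max := by
  intro value _ hpre
  exact dec2max_spec' value hpre
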